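-- pv_equiv track=rewrite | github.com/maku77/contest | codejam/2014_Round1C/B-ReorderingTrainCars.py | is_valid_trains
-- ===== SOURCE A (Python) =====
-- def is_valid_trains(trains):
--     used = set()
--     for t in trains:
--         if t[0] in used:  # 別の列車で使われている
--             return False
--         used.add(t[0])
--         for i in range(1, len(t)):
--             if t[i-1] != t[i]:
--                 if t[i] in used:
--                     return False
--                 used.add(t[i])
--     return True
-- ===== SOURCE B (Python) =====
-- def is_valid_trains(trains):
--     all_cars = [c for t in trains
--                 for c in list(t[:1]) + [t[i] for i in range(1, len(t)) if t[i] != t[i-1]]]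
--     s = sorted(all_cars)
--     return all(a != b for a, b in zip(s, s[1:]))
-- ===== Notes on version B (the rewrite author's own statement) =====
-- stated objective: alternative
-- what changed: Duplicate detection by sorting instead of hashing: B concatenates every train's run-collapsed car sequence, sorts the combined list, and declares validity iff no two adjacent sorted elements are equal, replacing A's streaming early-exit membership test against a growing set.
import Mathlib
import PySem

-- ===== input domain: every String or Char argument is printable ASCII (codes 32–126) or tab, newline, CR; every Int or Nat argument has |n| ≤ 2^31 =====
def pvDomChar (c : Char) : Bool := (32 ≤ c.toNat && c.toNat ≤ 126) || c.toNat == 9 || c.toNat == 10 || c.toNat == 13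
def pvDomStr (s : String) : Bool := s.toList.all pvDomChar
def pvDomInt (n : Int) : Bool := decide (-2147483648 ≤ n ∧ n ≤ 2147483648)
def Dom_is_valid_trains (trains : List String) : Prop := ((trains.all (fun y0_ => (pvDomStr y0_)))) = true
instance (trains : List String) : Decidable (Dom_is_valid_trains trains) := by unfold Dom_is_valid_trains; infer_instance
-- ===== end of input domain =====

-- B detects duplicates by sorting the concatenated run-collapsed car list and scanning adjacent pairs, instead of A's streaming early-exit membership test against a growing set (alternative algorithm: comparison sort vs hashing).

-- ===== PORT A =====
-- inner 'for i in range(1, len(t))' loop: prev = t[i-1]; none = early 'return False'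
def pvInnerA (used : PySem.Set Char) (prev : Char) (rest : List Char) : Option (PySem.Set Char) :=
  match rest with
  | [] => some used
  | c :: cs =>
    if prev ≠ c then
      if PySem.Set.contains used c then none
      else pvInnerA (PySem.Set.add used c) c cs
    else pvInnerA used c cs

-- outer 'for t in trains' loop carrying 'used'
def pvGoA (used : PySem.Set Char) (trains : List String) : Bool :=
  match trains with
  | [] => true
  | t :: rest =>
    match t.toList with
    | [] => false  -- t[0] raises IndexError on an empty train; excluded by Pre_
    | c :: cs =>
      if PySem.Set.contains used c then false
      else
        match pvInnerA (PySem.Set.add used c) c cs with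
        | none => false
        | some used' => pvGoA used' rest

def is_valid_trains (trains : List String) : Bool :=
  pvGoA PySem.Set.empty trains

-- ===== PORT B =====
-- [t[i] for i in range(1, len(t)) if t[i] != t[i-1]]
def pvCollapseAux (prev : Char) (rest : List Char) : List Char :=
  match rest with
  | [] => []
  | c :: cs => if c ≠ prev then c :: pvCollapseAux c cs else pvCollapseAux c cs

-- list(t[:1]) + [t[i] for i in range(1, len(t)) if t[i] != t[i-1]]
def pvCollapse (cs : List Char) : List Char :=
  match cs with
  | [] => []  -- list(t[:1]) is [] on an empty train
  | c :: rest => c :: pvCollapseAux c rest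

-- all(a != b for a, b in zip(s, s[1:]))
def pvAdjDistinct : List Char → Bool
  | [] => true
  | [_] => true
  | a :: b :: rest => a ≠ b && pvAdjDistinct (b :: rest)

def is_valid_trains_alt (trains : List String) : Bool :=
  let allCars := trains.flatMap (fun t => pvCollapse t.toList)
  let s := PySem.List.sorted allCars (fun c => c) false
  pvAdjDistinct s

-- ===== PRECONDITION & SPEC =====
-- Pre_ excludes exactly the inputs on which A raises IndexError: those where an empty-string
-- train is reached, i.e. '' occurs and the run-collapsed cars of the trains before the first ''
-- are all distinct (otherwise A returns False before reaching the empty train).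
def Pre_is_valid_trains (trains : List String) : Prop :=
  "" ∈ trains →
    ¬ ((trains.takeWhile (fun t => decide (t ≠ ""))).flatMap (fun t => t.toList.destutter (· ≠ ·))).Nodup
instance (trains : List String) : Decidable (Pre_is_valid_trains trains) := by unfold Pre_is_valid_trains; infer_instance
def pvWitness_is_valid_trains : List String := ["aab", "cd"]

def Spec_is_valid_trains (trains : List String) (out : Bool) : Prop := out = is_valid_trains_alt trains
instance (trains : List String) (out : Bool) : Decidable (Spec_is_valid_trains trains out) := by unfold Spec_is_valid_trains; infer_instance

-- ===== CLAIM (what is proved, stated in full; the proofs are below) =====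
def Claim_equal_is_valid_trains : Prop := ∀ (trains : List String), Dom_is_valid_trains trains → Pre_is_valid_trains trains → Spec_is_valid_trains trains (is_valid_trains trains)

-- ===== LEMMAS AND PROOFS =====

theorem pvCollapseAux_eq_destutter' (rest : List Char) : ∀ (prev : Char),
    prev :: pvCollapseAux prev rest = List.destutter' (· ≠ ·) prev rest := by
  induction rest with
  | nil => intro prev; rfl
  | cons c cs ih =>
    intro prev
    by_cases h : prev = c
    · subst h
      simp [pvCollapseAux, List.destutter', ← ih]
    · simp [pvCollapseAux, List.destutter', h, Ne.symm h, ← ih]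

theorem pvCollapse_eq_destutter (cs : List Char) :
    pvCollapse cs = List.destutter (· ≠ ·) cs := by
  cases cs with
  | nil => rfl
  | cons c rest => rw [pvCollapse, List.destutter_cons', pvCollapseAux_eq_destutter']

-- proof-side streaming checker over an already-collapsed list
def pvChk (used : PySem.Set Char) (l : List Char) : Option (PySem.Set Char) :=
  match l with
  | [] => some used
  | c :: cs => if PySem.Set.contains used c then none else pvChk (PySem.Set.add used c) cs

theorem pvInnerA_eq_chk (cs : List Char) : ∀ (prev : Char) (used : PySem.Set Char),
    pvInnerA used prev cs = pvChk used (pvCollapseAux prev cs) := by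
  induction cs with
  | nil => intro prev used; rfl
  | cons c cs ih =>
    intro prev used
    by_cases h : prev = c
    · subst h
      simp [pvInnerA, pvCollapseAux, ih]
    · simp [pvInnerA, pvCollapseAux, h, Ne.symm h, pvChk]
      split_ifs <;> simp [ih]

theorem pvChk_append (l1 l2 : List Char) : ∀ (used : PySem.Set Char),
    pvChk used (l1 ++ l2) = (pvChk used l1).bind (fun u => pvChk u l2) := by
  induction l1 with
  | nil => intro used; rfl
  | cons c cs ih =>
    intro used
    simp [pvChk]
    split_ifs <;> simp [ih]

theorem pvGoA_eq_chk (trains : List String) : ∀ (used : PySem.Set Char),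
    (∀ t ∈ trains, t.toList ≠ []) →
    pvGoA used trains = (pvChk used (trains.flatMap (fun t => pvCollapse t.toList))).isSome := by
  induction trains with
  | nil => intro used _; rfl
  | cons t rest ih =>
    intro used hpre
    have hne : t.toList ≠ [] := hpre t (by simp)
    obtain ⟨c, cs, hcs⟩ : ∃ c cs, t.toList = c :: cs := by
      cases h : t.toList with
      | nil => exact absurd h hne
      | cons a l => exact ⟨a, l, rfl⟩
    have hrest : ∀ x ∈ rest, x.toList ≠ [] := fun x hx => hpre x (by simp [hx])
    simp only [List.flatMap_cons, pvGoA, hcs, pvCollapse, List.cons_append, pvChk]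
    split_ifs with h
    · rfl
    · rw [pvChk_append, pvInnerA_eq_chk]
      cases hres : pvChk (PySem.Set.add used c) (pvCollapseAux c cs) with
      | none => simp
      | some u => simp [ih u hrest, pvCollapse]

theorem pvChk_isSome_iff (l : List Char) : ∀ (used : PySem.Set Char),
    (pvChk used l).isSome = true ↔ (l.Nodup ∧ ∀ c ∈ l, c ∉ used) := by
  induction l with
  | nil => intro used; simp [pvChk]
  | cons c cs ih =>
    intro used
    simp only [pvChk]
    split_ifs with h
    · rw [PySem.Set.contains_iff] at h
      simp only [Option.isSome_none]
      constructor
      · intro h'; exact absurd h' (by simp)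
      · rintro ⟨_, hall⟩; exact absurd h (hall c (by simp))
    · have hc : c ∉ used := fun hm => h ((PySem.Set.contains_iff _ _).mpr hm)
      rw [ih]
      simp only [List.nodup_cons, List.mem_cons]
      constructor
      · rintro ⟨hnd, hall⟩
        refine ⟨⟨fun hm => ?_, hnd⟩, ?_⟩
        · exact (hall c hm) ((PySem.Set.mem_add _ _ _).mpr (Or.inr rfl))
        · rintro x (rfl | hx)
          · exact hc
          · intro hm; exact (hall x hx) ((PySem.Set.mem_add _ _ _).mpr (Or.inl hm))
      · rintro ⟨⟨hcn, hnd⟩, hall⟩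
        refine ⟨hnd, fun x hx hm => ?_⟩
        rcases (PySem.Set.mem_add _ _ _).mp hm with hm | rfl
        · exact hall x (Or.inr hx) hm
        · exact hcn hx

theorem pvGoA_prefix_false (pre : List String) : ∀ (used : PySem.Set Char) (rest : List String),
    (∀ t ∈ pre, t.toList ≠ []) →
    pvChk used (pre.flatMap (fun t => pvCollapse t.toList)) = none →
    pvGoA used (pre ++ rest) = false := by
  induction pre with
  | nil => intro used rest _ hchk; simp [pvChk] at hchk
  | cons t pre' ih =>
    intro used rest hne hchk
    obtain ⟨c, cs, hcs⟩ : ∃ c cs, t.toList = c :: cs := by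
      cases h : t.toList with
      | nil => exact absurd h (hne t (by simp))
      | cons a l => exact ⟨a, l, rfl⟩
    rw [List.flatMap_cons, pvChk_append, hcs] at hchk
    simp only [List.cons_append, pvGoA, hcs, pvCollapse, pvChk] at hchk ⊢
    split_ifs with h
    · rfl
    · simp only [if_neg h] at hchk
      rw [pvInnerA_eq_chk]
      cases hres : pvChk (PySem.Set.add used c) (pvCollapseAux c cs) with
      | none => rfl
      | some u =>
        rw [hres] at hchk
        exact ih u rest (fun x hx => hne x (by simp [hx])) (by simpa using hchk)

theorem pvChk_empty_isSome (l : List Char) :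
    (pvChk PySem.Set.empty l).isSome = true ↔ l.Nodup := by
  rw [pvChk_isSome_iff]
  constructor
  · exact fun h => h.1
  · exact fun h => ⟨h, fun c _ hc => by simp [PySem.Set.empty] at hc⟩

-- B-side: the adjacent-pair scan decides IsChain (≠)
theorem pvAdjDistinct_iff_chain (s : List Char) :
    pvAdjDistinct s = true ↔ s.IsChain (· ≠ ·) := by
  induction s with
  | nil => simp [pvAdjDistinct]
  | cons a t ih =>
    cases t with
    | nil => simp [pvAdjDistinct]
    | cons b r =>
      rw [List.isChain_cons_cons, ← ih]
      simp [pvAdjDistinct]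

-- on a (≤)-sorted list, no adjacent equal pair ⇔ no duplicates at all
theorem chain_ne_iff_nodup_of_sorted (s : List Char) (hs : s.Pairwise (· ≤ ·)) :
    s.IsChain (· ≠ ·) ↔ s.Nodup := by
  constructor
  · intro hc
    have hle : s.IsChain (· ≤ ·) := hs.isChain
    have hlt : s.IsChain (· < ·) := by
      induction s with
      | nil => exact List.isChain_nil
      | cons a t ih =>
        cases t with
        | nil => exact List.isChain_singleton a
        | cons b r =>
          rw [List.isChain_cons_cons] at hc hle ⊢
          exact ⟨lt_of_le_of_ne hle.1 hc.1,
            ih (List.Pairwise.sublist (List.sublist_cons_self a _) hs) hc.2 hle.2⟩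
    have hplt : s.Pairwise (· < ·) := List.isChain_iff_pairwise.mp hlt
    exact List.Pairwise.imp ne_of_lt hplt
  · intro hnd
    exact hnd.isChain

theorem alt_iff_nodup (trains : List String) :
    is_valid_trains_alt trains = true ↔
      (trains.flatMap (fun t => pvCollapse t.toList)).Nodup := by
  unfold is_valid_trains_alt
  set L := trains.flatMap (fun t => pvCollapse t.toList) with hL
  rw [pvAdjDistinct_iff_chain,
    chain_ne_iff_nodup_of_sorted _ (PySem.List.sorted_pairwise (xs := L) (key := fun c => c))]
  exact List.Perm.nodup_iff (PySem.List.sorted_perm (xs := L) (key := fun c => c) (rev := false))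

-- ===== VERDICT (by name: the statement is the Claim_ definition above) =====
theorem is_valid_trains_spec : Claim_equal_is_valid_trains := by
  intro trains _ hpre
  unfold Spec_is_valid_trains is_valid_trains
  by_cases hmem : "" ∈ trains
  · -- A returns False before reaching the first empty train; B's sorted scan sees the same duplicate
    have hdup : ¬ ((trains.takeWhile (fun t => decide (t ≠ ""))).flatMap
        (fun t => pvCollapse t.toList)).Nodup := by
      simpa only [pvCollapse_eq_destutter] using hpre hmem
    have hsplit : trains.takeWhile (fun t => decide (t ≠ "")) ++
        trains.dropWhile (fun t => decide (t ≠ "")) = trains := List.takeWhile_append_dropWhile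
    have hprene : ∀ t ∈ trains.takeWhile (fun t => decide (t ≠ "")), t.toList ≠ [] := by
      intro t ht htl
      have := List.mem_takeWhile_imp ht
      simp only [decide_eq_true_eq] at this
      exact this (String.toList_eq_nil_iff.mp htl)
    have hchk : pvChk PySem.Set.empty
        ((trains.takeWhile (fun t => decide (t ≠ ""))).flatMap (fun t => pvCollapse t.toList)) = none := by
      cases h : pvChk PySem.Set.empty
          ((trains.takeWhile (fun t => decide (t ≠ ""))).flatMap (fun t => pvCollapse t.toList)) with
      | none => rfl
      | some u =>
        exact absurd ((pvChk_empty_isSome _).mp (by rw [h]; rfl)) hdup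
    have hA : pvGoA PySem.Set.empty trains = false := by
      rw [← hsplit]
      exact pvGoA_prefix_false _ PySem.Set.empty _ hprene hchk
    have hB : ¬ (trains.flatMap (fun t => pvCollapse t.toList)).Nodup := by
      intro hnd
      rw [← hsplit, List.flatMap_append] at hnd
      exact hdup (List.nodup_append.mp hnd).1
    rw [hA]
    cases hb : is_valid_trains_alt trains with
    | false => rfl
    | true => exact absurd ((alt_iff_nodup trains).mp hb) hB
  · -- no empty train: A streams through everything; both sides decide Nodup
    have hne : ∀ t ∈ trains, t.toList ≠ [] := by
      intro t ht htl
      exact hmem (String.toList_eq_nil_iff.mp htl ▸ ht)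
    rw [pvGoA_eq_chk trains PySem.Set.empty hne]
    cases hb : is_valid_trains_alt trains with
    | false =>
      rw [Bool.eq_false_iff]
      intro hsome
      have hnd := (pvChk_empty_isSome _).mp hsome
      exact absurd ((alt_iff_nodup trains).mpr hnd) (by simp [hb])
    | true =>
      exact (pvChk_empty_isSome _).mpr ((alt_iff_nodup trains).mp hb)
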